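-- pv_equiv track=rewrite | github.com/gpedrani/Final_Project_PHYS-513 | imports.py | find_subspaces
-- ===== SOURCE A (Python) =====
-- def find_subspaces(L):
--     subspaces = []
--     for i in range(0, L):
--         for j in range(i,L):
--             a = list(range(i , j+1))
--             subspaces.append(a)
--     subspaces.sort(key=len)
--     subspaces = subspaces[0:-1]
--     return subspaces
-- ===== SOURCE B (Python) =====
-- def find_subspaces(L):
--     subspaces = []
--     for length in range(1, L):
--         for i in range(0, L - length + 1):
--             subspaces.append(list(range(i, i + length)))
--     return subspaces
-- ===== Notes on version B (the rewrite author's own statement) =====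
-- stated objective: simpler
-- what changed: B generates the subranges directly in (length, start) order with two loops, so the sort and the trailing [0:-1] drop of the full range disappear (the full-length range is simply never generated).
import Mathlib
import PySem

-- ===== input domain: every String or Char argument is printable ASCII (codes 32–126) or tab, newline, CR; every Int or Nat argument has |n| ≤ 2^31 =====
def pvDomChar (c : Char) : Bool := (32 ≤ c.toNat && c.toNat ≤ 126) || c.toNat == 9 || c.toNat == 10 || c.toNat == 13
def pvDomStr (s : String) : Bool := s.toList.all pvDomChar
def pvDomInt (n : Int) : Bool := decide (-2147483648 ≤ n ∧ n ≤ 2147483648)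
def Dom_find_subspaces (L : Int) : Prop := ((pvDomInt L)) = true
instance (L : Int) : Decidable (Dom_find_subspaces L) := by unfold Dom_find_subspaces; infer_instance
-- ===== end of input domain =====

-- B generates the subranges directly in (length, start) order, so A's sort and its [0:-1] drop of the full range disappear.

-- ===== PORT A =====
def find_subspaces (L : Int) : List (List Int) :=
  let subspaces : List (List Int) :=
    (PySem.List.pyRange 0 L 1).foldl (fun subspaces i =>
      (PySem.List.pyRange i L 1).foldl (fun subspaces j =>
        subspaces ++ [PySem.List.pyRange i (j + 1) 1]) subspaces) []
  let subspaces := PySem.List.sorted subspaces (fun a => PySem.List.len a) false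
  PySem.List.slice subspaces (some 0) (some (-1))

-- ===== PORT B =====
def find_subspaces_alt (L : Int) : List (List Int) :=
  (PySem.List.pyRange 1 L 1).foldl (fun subspaces length =>
    (PySem.List.pyRange 0 (L - length + 1) 1).foldl (fun subspaces i =>
      subspaces ++ [PySem.List.pyRange i (i + length) 1]) subspaces) []

-- ===== PRECONDITION & SPEC =====
def Spec_find_subspaces (L : Int) (out : List (List Int)) : Prop := out = find_subspaces_alt L
instance (L : Int) (out : List (List Int)) : Decidable (Spec_find_subspaces L out) := by unfold Spec_find_subspaces; infer_instance

-- ===== CLAIM (what is proved, stated in full; the proofs are below) =====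
def Claim_equal_find_subspaces : Prop := ∀ (L : Int), Dom_find_subspaces L → Spec_find_subspaces L (find_subspaces L)

-- ===== LEMMAS AND PROOFS =====

-- insertBy lands at the split point: everything in P refuses x, the head of Q (if any) accepts it
lemma insertBy_split {α : Type} (bf : α → α → Bool) (x : α) (P Q : List α)
    (hP : ∀ y ∈ P, bf x y = false)
    (hQ : ∀ q t, Q = q :: t → bf x q = true) :
    PySem.List.insertBy bf x (P ++ Q) = P ++ x :: Q := by
  induction P with
  | nil =>
      cases Q with
      | nil => simp [PySem.List.insertBy]
      | cons q t => simp [PySem.List.insertBy, hQ q t rfl]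
  | cons p P' ih =>
      have hp : bf x p = false := hP p (by simp)
      simp only [List.cons_append, PySem.List.insertBy, hp, Bool.false_eq_true, if_false]
      exact congrArg (p :: ·) (ih (fun y hy => hP y (by simp [hy])))

lemma flatMap_congr_mem {α β : Type} (l : List α) (f g : α → List β)
    (h : ∀ a ∈ l, f a = g a) : l.flatMap f = l.flatMap g := by
  induction l with
  | nil => rfl
  | cons a t ih =>
      simp only [List.flatMap_cons, h a (by simp), ih (fun a ha => h a (by simp [ha]))]

lemma flatten_map_singleton {α β : Type} (f : α → List β) (r : List α) :
    (List.map (fun i => [f i]) r).flatten = List.map f r := by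
  induction r with
  | nil => simp
  | cons a t ih => simp [ih]

-- a stable sort is the concatenation of the key-groups in increasing key order
lemma sorted_stable_groups {α : Type} (key : α → Int) (ks : List Int)
    (hks : ks.Pairwise (· < ·)) :
    ∀ xs : List α, (∀ x ∈ xs, key x ∈ ks) →
    PySem.List.sorted xs key false = ks.flatMap (fun k => xs.filter (fun x => decide (key x = k))) := by
  intro xs
  induction xs using List.reverseRecOn with
  | nil => intro _; simp [PySem.List.sorted]
  | append_singleton xs x ih =>
      intro hcov
      have hx : key x ∈ ks := hcov x (by simp)
      have hxs : ∀ y ∈ xs, key y ∈ ks := fun y hy => hcov y (by simp [hy])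
      have step : PySem.List.sorted (xs ++ [x]) key false =
          PySem.List.insertBy (fun a b => decide (key a < key b)) x (PySem.List.sorted xs key false) := by
        simp [PySem.List.sorted, List.foldl_append]
      rw [step, ih hxs]
      obtain ⟨ks1, ks2, hsplit⟩ := List.append_of_mem hx
      subst hsplit
      have hpw := hks
      rw [List.pairwise_append] at hpw
      obtain ⟨hpw1, hpw2, hcross⟩ := hpw
      rw [List.pairwise_cons] at hpw2
      obtain ⟨hgt, _⟩ := hpw2
      rw [List.flatMap_append, List.flatMap_cons]
      rw [List.flatMap_append, List.flatMap_cons]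
      rw [show ks1.flatMap (fun k => xs.filter (fun y => decide (key y = k))) ++
            (xs.filter (fun y => decide (key y = key x)) ++
             ks2.flatMap (fun k => xs.filter (fun y => decide (key y = k)))) =
          (ks1.flatMap (fun k => xs.filter (fun y => decide (key y = k))) ++
            xs.filter (fun y => decide (key y = key x))) ++
             ks2.flatMap (fun k => xs.filter (fun y => decide (key y = k))) from by
        simp [List.append_assoc]]
      rw [insertBy_split _ x _ _
        (by
          intro y hy
          simp only [List.mem_append, List.mem_flatMap, List.mem_filter] at hy
          rcases hy with ⟨k, hk, _, hkey⟩ | ⟨_, hkey⟩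
          · have : k < key x := hcross k hk (key x) (by simp)
            simp at hkey ⊢; omega
          · simp at hkey ⊢; omega)
        (by
          intro q t hQ
          have hq : q ∈ ks2.flatMap (fun k => xs.filter (fun y => decide (key y = k))) := by
            rw [hQ]; simp
          simp only [List.mem_flatMap, List.mem_filter] at hq
          obtain ⟨k, hk, _, hkey⟩ := hq
          have : key x < k := hgt k hk
          simp at hkey ⊢; omega)]
      have e1 : ks1.flatMap (fun k => (xs ++ [x]).filter (fun y => decide (key y = k))) =
          ks1.flatMap (fun k => xs.filter (fun y => decide (key y = k))) := by
        apply flatMap_congr_mem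
        intro k hk
        have hne : key x ≠ k := by have := hcross k hk (key x) (by simp); omega
        simp [List.filter_append, hne]
      have e2 : ks2.flatMap (fun k => (xs ++ [x]).filter (fun y => decide (key y = k))) =
          ks2.flatMap (fun k => xs.filter (fun y => decide (key y = k))) := by
        apply flatMap_congr_mem
        intro k hk
        have hne : key x ≠ k := by have := hgt k hk; omega
        simp [List.filter_append, hne]
      have e3 : (xs ++ [x]).filter (fun y => decide (key y = key x)) =
          xs.filter (fun y => decide (key y = key x)) ++ [x] := by
        simp [List.filter_append]
      rw [e1, e2, e3]
      simp [List.append_assoc]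

-- the list A builds before sorting, in flatMap form
def gListA (L : Int) : List (List Int) :=
  (PySem.List.pyRange 0 L 1).flatMap (fun i =>
    (PySem.List.pyRange i L 1).map (fun j => PySem.List.pyRange i (j + 1) 1))

-- filtering an integer range down to one point
lemma filter_pyRange_point (a b c : Int) :
    (PySem.List.pyRange a b 1).filter (fun j => decide (j = c)) =
    if a ≤ c ∧ c < b then [c] else [] := by
  split_ifs with h
  · obtain ⟨h1, h2⟩ := h
    rw [PySem.List.pyRange_one_append a c b h1 (by omega),
        PySem.List.pyRange_one_cons (show c < b from h2)]
    rw [List.filter_append]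
    have e1 : (PySem.List.pyRange a c 1).filter (fun j => decide (j = c)) = [] := by
      rw [List.filter_eq_nil_iff]
      intro j hj
      have := (PySem.List.mem_pyRange_one).mp hj
      simp; omega
    have e2 : (PySem.List.pyRange (c+1) b 1).filter (fun j => decide (j = c)) = [] := by
      rw [List.filter_eq_nil_iff]
      intro j hj
      have := (PySem.List.mem_pyRange_one).mp hj
      simp; omega
    simp [e1, e2]
  · rw [List.filter_eq_nil_iff]
    intro j hj
    have := (PySem.List.mem_pyRange_one).mp hj
    simp; omega

-- the length-k group of the generated list
lemma filter_gListA (L k : Int) (h1 : 1 ≤ k) (h2 : k ≤ L) :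
    (gListA L).filter (fun x => decide ((PySem.List.len x) = k)) =
    (PySem.List.pyRange 0 (L - k + 1) 1).map (fun i => PySem.List.pyRange i (i + k) 1) := by
  unfold gListA
  rw [List.filter_flatMap]
  have hrow : ∀ i ∈ PySem.List.pyRange 0 L 1,
      (((PySem.List.pyRange i L 1).map (fun j => PySem.List.pyRange i (j + 1) 1)).filter
        (fun x => decide ((PySem.List.len x) = k))) =
      (if i ≤ L - k then [PySem.List.pyRange i (i + k) 1] else []) := by
    intro i _
    rw [List.filter_map]
    have hpred : ((PySem.List.pyRange i L 1).filter
        ((fun x => decide ((PySem.List.len x) = k)) ∘ fun j => PySem.List.pyRange i (j + 1) 1)) =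
        ((PySem.List.pyRange i L 1).filter (fun j => decide (j = i + k - 1))) := by
      apply List.filter_congr
      intro j hj
      have hm := (PySem.List.mem_pyRange_one).mp hj
      simp [Function.comp, PySem.List.length_pyRange_one]
      omega
    rw [hpred, filter_pyRange_point]
    split_ifs with hc hd hd
    · have e : i + k - 1 + 1 = i + k := by omega
      simp [e]
    · omega
    · omega
    · simp
  rw [flatMap_congr_mem _ _ _ hrow]
  rw [PySem.List.pyRange_one_append 0 (L - k + 1) L (by omega) (by omega)]
  rw [List.flatMap_append]
  have eA : (PySem.List.pyRange 0 (L - k + 1) 1).flatMap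
      (fun i => if i ≤ L - k then [PySem.List.pyRange i (i + k) 1] else []) =
      (PySem.List.pyRange 0 (L - k + 1) 1).map (fun i => PySem.List.pyRange i (i + k) 1) := by
    rw [flatMap_congr_mem _ _ (fun i => [PySem.List.pyRange i (i + k) 1]) (by
      intro i hi
      have := (PySem.List.mem_pyRange_one).mp hi
      rw [if_pos (by omega)])]
    induction (PySem.List.pyRange 0 (L - k + 1) 1) with
    | nil => rfl
    | cons a t ih => simp_all
  have eB : (PySem.List.pyRange (L - k + 1) L 1).flatMap
      (fun i => if i ≤ L - k then [PySem.List.pyRange i (i + k) 1] else []) = [] := by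
    rw [flatMap_congr_mem _ _ (fun _ => []) (by
      intro i hi
      have := (PySem.List.mem_pyRange_one).mp hi
      rw [if_neg (by omega)])]
    simp
  rw [eA, eB, List.append_nil]

lemma sorted_gListA (L : Int) :
    PySem.List.sorted (gListA L) (fun a => PySem.List.len a) false =
    (PySem.List.pyRange 1 (L + 1) 1).flatMap (fun k =>
      (PySem.List.pyRange 0 (L - k + 1) 1).map (fun i => PySem.List.pyRange i (i + k) 1)) := by
  rw [sorted_stable_groups (fun a => PySem.List.len a) (PySem.List.pyRange 1 (L + 1) 1)
    (PySem.List.pairwise_lt_pyRange_one 1 (L + 1)) (gListA L) (by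
      intro x hx
      simp only [gListA, List.mem_flatMap, List.mem_map] at hx
      obtain ⟨i, hi, j, hj, rfl⟩ := hx
      have hi' := (PySem.List.mem_pyRange_one).mp hi
      have hj' := (PySem.List.mem_pyRange_one).mp hj
      rw [PySem.List.mem_pyRange_one]
      simp [PySem.List.length_pyRange_one]
      omega)]
  apply flatMap_congr_mem
  intro k hk
  have hk' := (PySem.List.mem_pyRange_one).mp hk
  exact filter_gListA L k (by omega) (by omega)

lemma a_flat (L : Int) :
    find_subspaces L =
    PySem.List.slice (PySem.List.sorted (gListA L) (fun a => PySem.List.len a) false)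
      (some 0) (some (-1)) := by
  unfold find_subspaces gListA
  simp only [PySem.List.foldl_append_singleton_eq_map, PySem.List.foldl_append_eq_flatMap,
    List.flatMap, List.nil_append]

lemma alt_flat (L : Int) :
    find_subspaces_alt L =
    (PySem.List.pyRange 1 L 1).flatMap (fun k =>
      (PySem.List.pyRange 0 (L - k + 1) 1).map (fun i => PySem.List.pyRange i (i + k) 1)) := by
  simp [find_subspaces_alt, PySem.List.foldl_append_singleton_eq_map,
    PySem.List.foldl_append_eq_flatMap, List.flatMap]
  exact congrArg List.flatten (List.map_congr_left (fun k _ => flatten_map_singleton _ _))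

-- ===== VERDICT (by name: the statement is the Claim_ definition above) =====
theorem find_subspaces_spec : Claim_equal_find_subspaces := by
  intro L _
  show find_subspaces L = find_subspaces_alt L
  rw [a_flat, alt_flat, sorted_gListA]
  by_cases hL : 1 ≤ L
  · rw [PySem.List.pyRange_one_succ_right (show (1:Int) ≤ L from hL)]
    rw [List.flatMap_append, List.flatMap_cons, List.flatMap_nil, List.append_nil]
    have ecol : (PySem.List.pyRange 0 (L - L + 1) 1).map
        (fun i => PySem.List.pyRange i (i + L) 1) = [PySem.List.pyRange 0 L 1] := by
      have e0 : L - L + 1 = (0 : Int) + 1 := by omega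
      rw [e0, PySem.List.pyRange_one_singleton]
      simp
    rw [ecol, PySem.List.slice_zero_start, PySem.List.slice_to_neg_one, List.dropLast_concat]
  · have h0 : PySem.List.pyRange 1 (L + 1) 1 = [] := PySem.List.pyRange_one_eq_nil (by omega)
    have h1 : PySem.List.pyRange 1 L 1 = [] := PySem.List.pyRange_one_eq_nil (by omega)
    simp [h0, h1, PySem.List.slice]
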